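-- pv_equiv track=rewrite | github.com/JackFloGit/Terre | Eau/eau01.py | generate_second_sequence_numbers
-- ===== SOURCE A (Python) =====
-- def generate_second_sequence_numbers(first_sequence):
--     second_sequence_list = []
--     count = 0
--     for number in first_sequence:
--         if int(number) == 00:
--             count += 1
--             unit_sequence = count % 10
--             tens_sequence = count // 10
--             to_string_unit = str(unit_sequence)
--             to_string_tens = str(tens_sequence)
--             sequence_number = to_string_tens + to_string_unit
--             second_sequence_list.append(sequence_number)
--     return second_sequence_list
-- ===== SOURCE B (Python) =====
-- def generate_second_sequence_numbers(first_sequence):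
--     count = sum(1 for number in first_sequence if int(number) == 0)
--     return [f"{i // 10}{i % 10}" for i in range(1, count + 1)]
-- ===== Notes on version B (the rewrite author's own statement) =====
-- stated objective: simpler
-- what changed: A builds the list inside the scanning loop, carrying list+counter state; B first counts the zeros in one pass and then generates the output strings from range(1, count+1) in a second, input-independent pass.
import Mathlib
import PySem

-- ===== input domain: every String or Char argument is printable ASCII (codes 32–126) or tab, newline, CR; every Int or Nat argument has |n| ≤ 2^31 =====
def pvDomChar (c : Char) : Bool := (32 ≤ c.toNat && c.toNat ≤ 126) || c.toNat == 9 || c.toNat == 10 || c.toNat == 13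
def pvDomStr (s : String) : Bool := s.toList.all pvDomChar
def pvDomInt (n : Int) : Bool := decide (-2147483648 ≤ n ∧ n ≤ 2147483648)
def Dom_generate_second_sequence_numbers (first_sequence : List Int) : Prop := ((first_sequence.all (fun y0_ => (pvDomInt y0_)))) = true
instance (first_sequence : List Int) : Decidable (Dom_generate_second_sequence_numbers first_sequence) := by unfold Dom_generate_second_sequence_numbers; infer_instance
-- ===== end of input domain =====

-- B replaces A's single list-and-counter-building loop by a count pass followed by an
-- input-independent generation pass over range(1, count+1); objective: simpler.

-- ===== PORT A =====
-- single loop carrying (second_sequence_list, count); on a zero it appends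
-- str(count//10) + str(count%10)
def generate_second_sequence_numbers (first_sequence : List Int) : List String :=
  (first_sequence.foldl
    (fun (st : List String × Int) number =>
      if number == 0 then
        let count := st.2 + 1
        let unit_sequence := PySem.Int.mod count 10
        let tens_sequence := PySem.Int.floordiv count 10
        let to_string_unit := PySem.Int.toStr unit_sequence
        let to_string_tens := PySem.Int.toStr tens_sequence
        let sequence_number := to_string_tens ++ to_string_unit
        (st.1 ++ [sequence_number], count)
      else st)
    ([], 0)).1

-- ===== PORT B =====
-- count = sum(1 for number in first_sequence if int(number) == 0)
-- return [f"{i // 10}{i % 10}" for i in range(1, count + 1)]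
def generate_second_sequence_numbers_alt (first_sequence : List Int) : List String :=
  let count := first_sequence.foldl (fun c number => if number == 0 then c + 1 else c) (0 : Int)
  (PySem.List.pyRange 1 (count + 1) 1).map
    (fun i => PySem.Int.toStr (PySem.Int.floordiv i 10) ++ PySem.Int.toStr (PySem.Int.mod i 10))

-- ===== PRECONDITION & SPEC =====
def Spec_generate_second_sequence_numbers (first_sequence : List Int) (out : List String) : Prop := out = generate_second_sequence_numbers_alt first_sequence
instance (first_sequence : List Int) (out : List String) : Decidable (Spec_generate_second_sequence_numbers first_sequence out) := by unfold Spec_generate_second_sequence_numbers; infer_instance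

-- ===== CLAIM (what is proved, stated in full; the proofs are below) =====
def Claim_equal_generate_second_sequence_numbers : Prop := ∀ (first_sequence : List Int), Dom_generate_second_sequence_numbers first_sequence → Spec_generate_second_sequence_numbers first_sequence (generate_second_sequence_numbers first_sequence)

-- ===== LEMMAS AND PROOFS =====

def pvFmt (i : Int) : String :=
  PySem.Int.toStr (PySem.Int.floordiv i 10) ++ PySem.Int.toStr (PySem.Int.mod i 10)

def pvStepA (st : List String × Int) (number : Int) : List String × Int :=
  if number == 0 then (st.1 ++ [pvFmt (st.2 + 1)], st.2 + 1) else st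

def pvCnt (c : Int) (number : Int) : Int := if number == 0 then c + 1 else c

theorem pvCnt_ge : ∀ (xs : List Int) (c : Int), c ≤ xs.foldl pvCnt c := by
  intro xs
  induction xs with
  | nil => intro c; simp [List.foldl]
  | cons x xs ih =>
    intro c
    have h := ih (pvCnt c x)
    have : c ≤ pvCnt c x := by unfold pvCnt; split <;> omega
    calc c ≤ pvCnt c x := this
      _ ≤ (x :: xs).foldl pvCnt c := by simpa [List.foldl] using h

theorem pvKey : ∀ (xs : List Int) (acc : List String) (c : Int),
    (xs.foldl pvStepA (acc, c)).1
      = acc ++ (PySem.List.pyRange (c + 1) (xs.foldl pvCnt c + 1) 1).map pvFmt := by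
  intro xs
  induction xs with
  | nil =>
    intro acc c
    simp [List.foldl]
  | cons x xs ih =>
    intro acc c
    by_cases hx : x = 0
    · have hle : c + 1 ≤ xs.foldl pvCnt (c + 1) := pvCnt_ge xs (c + 1)
      have hcons : PySem.List.pyRange (c + 1) (xs.foldl pvCnt (c + 1) + 1) 1
          = (c + 1) :: PySem.List.pyRange (c + 2) (xs.foldl pvCnt (c + 1) + 1) 1 := by
        have := PySem.List.pyRange_one_cons (a := c + 1)
          (b := xs.foldl pvCnt (c + 1) + 1) (by omega)
        simpa [show c + 1 + 1 = c + 2 by ring] using this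
      simp only [List.foldl, pvStepA, pvCnt, hx, beq_self_eq_true, if_true]
      rw [ih (acc ++ [pvFmt (c + 1)]) (c + 1), hcons]
      simp [show c + 1 + 1 = c + 2 from by ring]
    · have hxb : (x == 0) = false := by simpa using hx
      simp only [List.foldl, pvStepA, pvCnt, hxb, Bool.false_eq_true, if_false]
      exact ih acc c

-- ===== VERDICT (by name: the statement is the Claim_ definition above) =====
theorem generate_second_sequence_numbers_spec : Claim_equal_generate_second_sequence_numbers := by
  intro fs _
  show generate_second_sequence_numbers fs = generate_second_sequence_numbers_alt fs
  have hA : generate_second_sequence_numbers fs = (fs.foldl pvStepA ([], 0)).1 := by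
    unfold generate_second_sequence_numbers
    have hf : (fun (st : List String × Int) (number : Int) =>
        if number == 0 then
          let count := st.2 + 1
          let unit_sequence := PySem.Int.mod count 10
          let tens_sequence := PySem.Int.floordiv count 10
          let to_string_unit := PySem.Int.toStr unit_sequence
          let to_string_tens := PySem.Int.toStr tens_sequence
          let sequence_number := to_string_tens ++ to_string_unit
          (st.1 ++ [sequence_number], count)
        else st) = pvStepA := by
      funext st n
      simp only [pvStepA, pvFmt]
    rw [hf]
  have hB : generate_second_sequence_numbers_alt fs
      = (PySem.List.pyRange 1 (fs.foldl pvCnt 0 + 1) 1).map pvFmt := by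
    unfold generate_second_sequence_numbers_alt
    have hc : (fun (c : Int) (number : Int) => if number == 0 then c + 1 else c) = pvCnt := by
      funext c n; simp only [pvCnt]
    have hm : (fun (i : Int) => PySem.Int.toStr (PySem.Int.floordiv i 10)
        ++ PySem.Int.toStr (PySem.Int.mod i 10)) = pvFmt := by
      funext i; simp only [pvFmt]
    rw [hc, hm]
  rw [hA, hB]
  simpa using pvKey fs [] 0
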